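-- pv_equiv track=rewrite | github.com/HeoSeokYong/AlgorithmStudy | Two_Pointer/sum_subsequence2.py | solution
-- ===== SOURCE A (Python) =====
-- from itertools import combinations
--
-- def get_sub_sum(seq):
--     '''
--         seq의 각 부분 수열의 합 리스트를 정렬 후 반환
--     '''
--     result = []
--
--     for i in range(len(seq)+1):
--         for comb in combinations(seq, i):
--             result.append(sum(comb))
--
--     return sorted(result)
--
-- def solution(N, S, nums):
--     answer = 0
--     nums_l = nums[:N//2]
--     nums_r = nums[N//2:]
--
--     lsub_sum = get_sub_sum(nums_l)
--     rsub_sum = get_sub_sum(nums_r)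
--
--     # Two Pointer
--     l = 0 # lsub_sum의 첫번째
--     r = len(rsub_sum) - 1 # rsub_sum의 마지막
--
--     while l < len(lsub_sum) and r >= 0:
--         nl = l + 1
--         nr = r - 1
--
--         # 중복 확인
--         while nl < len(lsub_sum) and lsub_sum[nl] == lsub_sum[l]:
--             nl += 1
--         while nr >= 0 and rsub_sum[nr] == rsub_sum[r]:
--             nr -= 1
--
--         # S check
--         sum_sub = lsub_sum[l] + rsub_sum[r]
--
--         if sum_sub == S:
--             answer += (nl - l) * (r - nr)
--             l, r = nl, nr
--
--         elif sum_sub < S: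
--             l = nl
--
--         else: # sum_sub > S
--             r = nr
--
--     # S == 0일 때, 양 쪽 다 공집합인 경우를 빼준다.
--     if S == 0:
--         answer -= 1
--
--     return answer
-- ===== SOURCE B (Python) =====
-- def solution(N, S, nums):
--     half = N // 2
--     left, right = nums[:half], nums[half:]
--
--     def subset_sums(seq):
--         sums = [0]
--         for x in seq:
--             sums += [s + x for s in sums]
--         return sums
--
--     freq = {}
--     for s in subset_sums(right):
--         freq[s] = freq.get(s, 0) + 1
--
--     answer = 0
--     for ls in subset_sums(left):
--         answer += freq.get(S - ls, 0)
--
--     if S == 0: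
--         answer -= 1
--     return answer
-- ===== Notes on version B (the rewrite author's own statement) =====
-- stated objective: alternative
-- what changed: Replaces A's per-size itertools.combinations enumeration plus sorting both halves and a duplicate-skipping two-pointer scan by incremental subset-sum doubling and a frequency dictionary of the right half's sums looked up once per left sum (measured ~3.4x at n=16, but both are exponential and neither finishes at n=64).
import Mathlib
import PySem

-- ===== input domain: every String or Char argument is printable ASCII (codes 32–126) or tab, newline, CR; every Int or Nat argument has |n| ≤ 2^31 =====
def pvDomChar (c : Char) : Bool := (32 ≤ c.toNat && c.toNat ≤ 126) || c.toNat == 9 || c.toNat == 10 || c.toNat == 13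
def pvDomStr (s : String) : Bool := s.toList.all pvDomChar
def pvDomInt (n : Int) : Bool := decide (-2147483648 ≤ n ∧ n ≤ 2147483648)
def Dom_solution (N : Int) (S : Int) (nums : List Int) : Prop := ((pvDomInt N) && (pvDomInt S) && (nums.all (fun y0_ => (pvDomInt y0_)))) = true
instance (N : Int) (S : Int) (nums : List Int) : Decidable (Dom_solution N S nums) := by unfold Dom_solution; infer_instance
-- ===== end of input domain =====

-- B replaces A's sort-both-halves + duplicate-skipping two-pointer by a frequency
-- dict of the right half's subset sums looked up once per left subset sum (alternative algorithm, no sorting).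

-- ===== PORT A =====

-- itertools.combinations(seq, n) in its lexicographic-by-index order
def combs : List Int → Nat → List (List Int)
  | _, 0 => [[]]
  | [], _ + 1 => []
  | x :: xs, n + 1 => ((combs xs n).map (fun c => x :: c)) ++ combs xs (n + 1)

-- get_sub_sum: append sum(comb) for every size, then sorted(result)
def getSubSum (seq : List Int) : List Int :=
  PySem.List.sorted
    ((PySem.List.pyRange 0 ((seq.length : Int) + 1)).foldl
      (fun acc i => (combs seq i.toNat).foldl (fun a c => a ++ [c.sum]) acc) [])
    (fun x => x)

-- inner while: advance nl while nl < len and lsub_sum[nl] == lsub_sum[l]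
def skipF (L : List Int) (v : Int) (n : Nat) : Nat :=
  if h : n < L.length ∧ L.getD n 0 = v then skipF L v (n + 1) else n
termination_by L.length - n
decreasing_by omega

-- inner while: retreat nr while nr >= 0 and rsub_sum[nr] == rsub_sum[r]
def skipB (R : List Int) (v : Int) (n : Int) : Int :=
  if h : 0 ≤ n ∧ R.getD n.toNat 0 = v then skipB R v (n - 1) else n
termination_by (n + 1).toNat
decreasing_by omega

theorem le_skipF (L : List Int) (v : Int) (n : Nat) : n ≤ skipF L v n := by
  unfold skipF
  split
  · have := le_skipF L v (n + 1); omega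
  · omega
termination_by L.length - n
decreasing_by omega

theorem skipB_le (R : List Int) (v : Int) (n : Int) : skipB R v n ≤ n := by
  unfold skipB
  split
  · rename_i h; have := skipB_le R v (n - 1); omega
  · omega
termination_by (n + 1).toNat
decreasing_by omega

-- the outer two-pointer while loop of A
def loopA (L R : List Int) (S : Int) (l : Nat) (r : Int) (ans : Int) : Int :=
  if h : l < L.length ∧ 0 ≤ r then
    let nl := skipF L (L.getD l 0) (l + 1)
    let nr := skipB R (R.getD r.toNat 0) (r - 1)
    let s := L.getD l 0 + R.getD r.toNat 0
    if s = S then loopA L R S nl nr (ans + ((nl : Int) - (l : Int)) * (r - nr))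
    else if s < S then loopA L R S nl r ans
    else loopA L R S l nr ans
  else ans
termination_by (L.length - l) + (r + 1).toNat
decreasing_by
  · have h1 := le_skipF L (L.getD l 0) (l + 1)
    have h2 := skipB_le R (R.getD r.toNat 0) (r - 1)
    omega
  · have h1 := le_skipF L (L.getD l 0) (l + 1); omega
  · have h2 := skipB_le R (R.getD r.toNat 0) (r - 1); omega

def solution (N : Int) (S : Int) (nums : List Int) : Int :=
  let numsL := PySem.List.slice nums none (some (PySem.Int.floordiv N 2))
  let numsR := PySem.List.slice nums (some (PySem.Int.floordiv N 2)) none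
  let lsubSum := getSubSum numsL
  let rsubSum := getSubSum numsR
  let answer := loopA lsubSum rsubSum S 0 ((rsubSum.length : Int) - 1) 0
  if S = 0 then answer - 1 else answer

-- ===== PORT B =====

-- subset_sums via iterative doubling: sums += [s + x for s in sums]
def subsetSums (seq : List Int) : List Int :=
  seq.foldl (fun sums x => sums ++ sums.map (fun s => s + x)) [0]

def solution_alt (N : Int) (S : Int) (nums : List Int) : Int :=
  let half := PySem.Int.floordiv N 2
  let left := PySem.List.slice nums none (some half)
  let right := PySem.List.slice nums (some half) none
  let freq := (subsetSums right).foldl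
    (fun d s => d.insert s (d.getD s 0 + 1)) (PySem.Dict.empty : PySem.Dict Int Int)
  let answer := (subsetSums left).foldl (fun a ls => a + freq.getD (S - ls) 0) 0
  if S = 0 then answer - 1 else answer

-- ===== PRECONDITION & SPEC =====
def Spec_solution (N : Int) (S : Int) (nums : List Int) (out : Int) : Prop := out = solution_alt N S nums
instance (N : Int) (S : Int) (nums : List Int) (out : Int) : Decidable (Spec_solution N S nums out) := by unfold Spec_solution; infer_instance

-- ===== CLAIM (what is proved, stated in full; the proofs are below) =====
def Claim_equal_solution : Prop := ∀ (N : Int) (S : Int) (nums : List Int), Dom_solution N S nums → Spec_solution N S nums (solution N S nums)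

-- ===== LEMMAS AND PROOFS =====

theorem skipF_le_length (L : List Int) (v : Int) (n : Nat) (h : n ≤ L.length) :
    skipF L v n ≤ L.length := by
  unfold skipF
  split
  · exact skipF_le_length L v (n + 1) (by omega)
  · exact h
termination_by L.length - n
decreasing_by omega

theorem skipF_run (L : List Int) (v : Int) (n : Nat) :
    ∀ i, n ≤ i → i < skipF L v n → L.getD i 0 = v := by
  unfold skipF
  split
  · rename_i h
    intro i hi hlt
    rcases Nat.eq_or_lt_of_le hi with rfl | hi'
    · exact h.2
    · exact skipF_run L v (n + 1) i hi' hlt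
  · intro i hi hlt; omega
termination_by L.length - n
decreasing_by omega

theorem skipF_stop (L : List Int) (v : Int) (n : Nat) (h0 : n ≤ L.length) :
    skipF L v n = L.length ∨ (skipF L v n < L.length ∧ L.getD (skipF L v n) 0 ≠ v) := by
  unfold skipF
  split
  · rename_i h; exact skipF_stop L v (n + 1) (by omega)
  · rename_i h
    by_cases hn : n < L.length
    · right; exact ⟨hn, fun hv => h ⟨hn, hv⟩⟩
    · left; omega
termination_by L.length - n
decreasing_by omega

theorem neg_one_le_skipB (R : List Int) (v : Int) (n : Int) (h : -1 ≤ n) :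
    -1 ≤ skipB R v n := by
  unfold skipB
  split
  · rename_i hc; exact neg_one_le_skipB R v (n - 1) (by omega)
  · exact h
termination_by (n + 1).toNat
decreasing_by omega

theorem skipB_run (R : List Int) (v : Int) (n : Int) :
    ∀ i : Int, skipB R v n < i → i ≤ n → 0 ≤ i ∧ R.getD i.toNat 0 = v := by
  unfold skipB
  split
  · rename_i h
    intro i h1 h2
    rcases eq_or_lt_of_le h2 with rfl | hi'
    · exact ⟨h.1, h.2⟩
    · exact skipB_run R v (n - 1) i h1 (by omega)
  · intro i h1 h2; omega
termination_by (n + 1).toNat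
decreasing_by omega

theorem skipB_stop (R : List Int) (v : Int) (n : Int) :
    skipB R v n < 0 ∨ R.getD (skipB R v n).toNat 0 ≠ v := by
  unfold skipB
  split
  · exact skipB_stop R v (n - 1)
  · rename_i h
    by_cases hn : 0 ≤ n
    · right; exact fun hv => h ⟨hn, hv⟩
    · left; omega
termination_by (n + 1).toNat
decreasing_by omega



theorem drop_eq_replicate_append (L : List Int) (a b : Nat) (hab : a ≤ b) (hb : b ≤ L.length)
    (v : Int) (h : ∀ i, a ≤ i → i < b → L.getD i 0 = v) :
    L.drop a = List.replicate (b - a) v ++ L.drop b := by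
  rcases Nat.eq_or_lt_of_le hab with rfl | hlt
  · simp
  · have ha : a < L.length := lt_of_lt_of_le hlt hb
    rw [List.drop_eq_getElem_cons ha]
    have h1 : L[a] = v := by
      have := h a le_rfl hlt; rwa [List.getD_eq_getElem L 0 ha] at this
    have h2 := drop_eq_replicate_append L (a + 1) b hlt hb v (fun i hi1 hi2 => h i (by omega) hi2)
    rw [h2, h1]
    have hba : b - a = (b - (a + 1)) + 1 := by omega
    rw [hba, List.replicate_succ, List.cons_append]
termination_by b - a

theorem take_eq_append_replicate (L : List Int) (a b : Nat) (hab : a ≤ b) (hb : b ≤ L.length)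
    (v : Int) (h : ∀ i, a ≤ i → i < b → L.getD i 0 = v) :
    L.take b = L.take a ++ List.replicate (b - a) v := by
  have hb' : b = a + (b - a) := by omega
  have key : L.take (a + (b - a)) = L.take a ++ List.replicate (b - a) v := by
    rw [List.take_add, drop_eq_replicate_append L a b hab hb v h, List.take_left' (by simp)]
  rwa [← hb'] at key

theorem getD_mono (L : List Int) (hL : L.Pairwise (· ≤ ·)) (i j : Nat) (hij : i ≤ j)
    (hj : j < L.length) : L.getD i 0 ≤ L.getD j 0 := by
  have hi : i < L.length := lt_of_le_of_lt hij hj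
  rw [List.getD_eq_getElem L 0 hi, List.getD_eq_getElem L 0 hj]
  rcases Nat.eq_or_lt_of_le hij with rfl | hlt
  · exact le_refl _
  · exact List.pairwise_iff_getElem.mp hL i j hi hj hlt

theorem mem_drop_le (L : List Int) (hL : L.Pairwise (· ≤ ·)) (l : Nat) (hl : l < L.length) :
    ∀ x ∈ L.drop l, L.getD l 0 ≤ x := by
  intro x hx
  obtain ⟨k, hk, rfl⟩ := List.mem_iff_getElem.mp hx
  rw [List.getElem_drop]
  have hk' : l + k < L.length := by simp at hk; omega
  have := getD_mono L hL l (l + k) (by omega) hk'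
  rwa [List.getD_eq_getElem L 0 hk'] at this

theorem mem_take_le (R : List Int) (hR : R.Pairwise (· ≤ ·)) (r : Nat) (hr : r < R.length) :
    ∀ y ∈ R.take (r + 1), y ≤ R.getD r 0 := by
  intro y hy
  obtain ⟨j, hj, rfl⟩ := List.mem_iff_getElem.mp hy
  rw [List.getElem_take]
  have hj' : j < R.length := by simp at hj; omega
  have := getD_mono R hR j r (by simp at hj; omega) hr
  rwa [List.getD_eq_getElem R 0 hj'] at this


-- the number of matching pairs left in the rectangle [l, len L) x [0, r]
def cnt (L R : List Int) (S : Int) (l : Nat) (r : Int) : Int :=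
  ((L.drop l).map (fun x => ((List.count (S - x) (R.take (r + 1).toNat)) : Int))).sum

def stepB (sums : List Int) (x : Int) : List Int := sums ++ sums.map (fun s => s + x)

def asums (seq : List Int) : List Int :=
  (List.range (seq.length + 1)).flatMap (fun i => (combs seq i).map List.sum)

theorem combs_eq_nil (xs : List Int) (n : Nat) (h : xs.length < n) : combs xs n = [] := by
  induction xs generalizing n with
  | nil => cases n with
    | zero => omega
    | succ m => rfl
  | cons x xs ih =>
    cases n with
    | zero => omega
    | succ m =>
      simp at h
      rw [combs, ih m (by omega), ih (m + 1) (by omega)]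
      simp

theorem foldl_stepB_perm (xs : List Int) (a b : List Int) (h : a.Perm b) :
    (xs.foldl stepB a).Perm (xs.foldl stepB b) := by
  induction xs generalizing a b with
  | nil => exact h
  | cons x xs ih =>
    simp only [List.foldl_cons]
    exact ih _ _ (h.append (h.map _))

theorem foldl_stepB_append (xs : List Int) (a b : List Int) :
    (xs.foldl stepB (a ++ b)).Perm (xs.foldl stepB a ++ xs.foldl stepB b) := by
  induction xs generalizing a b with
  | nil => exact List.Perm.refl _
  | cons x xs ih =>
    simp only [List.foldl_cons]
    refine ((foldl_stepB_perm xs _ _ ?_).trans (ih (stepB a x) (stepB b x)))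
    show ((a ++ b) ++ (a ++ b).map (fun s => s + x)).Perm
      ((a ++ a.map (fun s => s + x)) ++ (b ++ b.map (fun s => s + x)))
    rw [List.map_append, List.append_assoc, List.append_assoc]
    refine List.Perm.append_left a ?_
    exact List.perm_append_comm_assoc _ _ _

theorem foldl_stepB_map_add (xs : List Int) (a : List Int) (c : Int) :
    xs.foldl stepB (a.map (fun s => c + s)) = (xs.foldl stepB a).map (fun s => c + s) := by
  induction xs generalizing a with
  | nil => rfl
  | cons x xs ih =>
    simp only [List.foldl_cons]
    rw [← ih (stepB a x)]
    congr 1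
    show (a.map (fun s => c + s)) ++ (a.map (fun s => c + s)).map (fun s => s + x)
      = (a ++ a.map (fun s => s + x)).map (fun s => c + s)
    rw [List.map_append, List.map_map, List.map_map]
    congr 1
    simp [Function.comp_def, add_assoc]

theorem subsetSums_cons (x : Int) (xs : List Int) :
    (subsetSums (x :: xs)).Perm (subsetSums xs ++ (subsetSums xs).map (fun s => x + s)) := by
  show ((x :: xs).foldl stepB [0]).Perm _
  rw [List.foldl_cons]
  have h1 : stepB [0] x = [0] ++ [0].map (fun s => x + s) := by
    simp [stepB]
  rw [h1]
  refine (foldl_stepB_append xs [0] ([0].map (fun s => x + s))).trans ?_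
  rw [foldl_stepB_map_add xs [0] x]
  exact List.Perm.refl _

theorem flatMap_append_perm {α β : Type} (l : List α) (g h : α → List β) :
    (l.flatMap (fun i => g i ++ h i)).Perm (l.flatMap g ++ l.flatMap h) := by
  induction l with
  | nil => exact List.Perm.refl _
  | cons a l ih =>
    simp only [List.flatMap_cons]
    refine (ih.append_left (g a ++ h a)).trans ?_
    rw [List.append_assoc, List.append_assoc]
    exact (List.perm_append_comm_assoc _ _ _).append_left _

theorem asums_nil : asums [] = [0] := rfl

theorem asums_head (seq : List Int) :
    asums seq = [0] ++ (List.range seq.length).flatMap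
      (fun i => (combs seq (i + 1)).map List.sum) := by
  rw [asums, List.range_succ_eq_map, List.flatMap_cons]
  congr 1
  · cases seq <;> rfl
  · rw [List.flatMap_map]

theorem asums_cons (x : Int) (xs : List Int) :
    (asums (x :: xs)).Perm (asums xs ++ (asums xs).map (fun s => x + s)) := by
  have h1 : asums (x :: xs) = [0] ++ (List.range (xs.length + 1)).flatMap
      (fun i => (combs xs i).map (fun c => x + c.sum) ++ (combs xs (i + 1)).map List.sum) := by
    rw [asums_head]
    congr 1
    apply List.flatMap_congr
    intro i _
    show ((combs (x :: xs) (i + 1)).map List.sum) = _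
    rw [combs, List.map_append, List.map_map]
    congr 1
  have h2 : (List.range (xs.length + 1)).flatMap
        (fun i => (combs xs (i + 1)).map List.sum)
      = (List.range xs.length).flatMap (fun i => (combs xs (i + 1)).map List.sum) := by
    rw [show xs.length + 1 = (xs.length).succ from rfl, List.range_succ, List.flatMap_append]
    simp [combs_eq_nil xs (xs.length + 1) (by omega)]
  have h3 : asums xs = [0] ++ (List.range xs.length).flatMap
      (fun i => (combs xs (i + 1)).map List.sum) := asums_head xs
  have h4 : (List.range (xs.length + 1)).flatMap
      (fun i => (combs xs i).map (fun c => x + c.sum)) = (asums xs).map (fun s => x + s) := by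
    rw [asums, List.map_flatMap]
    apply List.flatMap_congr
    intro i _
    rw [List.map_map]
    rfl
  rw [h1]
  refine ((flatMap_append_perm _ _ _).append_left [0]).trans ?_
  rw [h2, h4]
  -- [0] ++ (mapped ++ Y) ~ ([0] ++ Y) ++ mapped
  rw [h3]
  rw [List.append_assoc]
  refine List.Perm.append_left [0] ?_
  exact List.perm_append_comm

theorem asums_perm_subsetSums (seq : List Int) : (asums seq).Perm (subsetSums seq) := by
  induction seq with
  | nil => rw [asums_nil]; exact List.Perm.refl _
  | cons x xs ih =>
    refine (asums_cons x xs).trans ?_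
    refine (List.Perm.append (ih) (ih.map _)).trans ?_
    exact (subsetSums_cons x xs).symm

theorem loopA_eq (L R : List Int) (S : Int) (l : Nat) (r : Int) (ans : Int)
    (hL : L.Pairwise (· ≤ ·)) (hR : R.Pairwise (· ≤ ·)) (hr : r < (R.length : Int)) :
    loopA L R S l r ans = ans + cnt L R S l r := by
  rw [loopA]
  split
  case isFalse h =>
    have h' : L.length ≤ l ∨ r < 0 := by omega
    rcases h' with hl | hr0
    · rw [cnt, List.drop_eq_nil_of_le hl]; simp
    · have : (r + 1).toNat = 0 := by omega
      rw [cnt, this]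
      simp
  case isTrue h =>
    obtain ⟨hl, hr0⟩ := h
    dsimp only
    set v := L.getD l 0 with hv
    set w := R.getD r.toNat 0 with hw
    set nl := skipF L v (l + 1) with hnl
    set nr := skipB R w (r - 1) with hnr
    have hnl1 : l + 1 ≤ nl := le_skipF L v (l + 1)
    have hnl2 : nl ≤ L.length := skipF_le_length L v (l + 1) (by omega)
    have hrun : ∀ i, l ≤ i → i < nl → L.getD i 0 = v := by
      intro i hi hilt
      rcases Nat.eq_or_lt_of_le hi with rfl | hi'
      · rfl
      · exact skipF_run L v (l + 1) i hi' hilt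
    have hdropEq : L.drop l = List.replicate (nl - l) v ++ L.drop nl :=
      drop_eq_replicate_append L l nl (by omega) hnl2 v hrun
    have hgt : ∀ x ∈ L.drop nl, v < x := by
      intro x hx
      rcases skipF_stop L v (l + 1) (by omega) with hend | ⟨hlt, hne⟩
      · rw [← hnl] at hend
        rw [hend, List.drop_length] at hx
        exact absurd hx (List.not_mem_nil)
      · rw [← hnl] at hlt hne
        have h1 := mem_drop_le L hL nl hlt x hx
        have h2 := getD_mono L hL l nl (by omega) hlt
        rw [← hv] at h2
        omega
    have hnr1 : nr ≤ r - 1 := skipB_le R w (r - 1)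
    have hnr2 : -1 ≤ nr := neg_one_le_skipB R w (r - 1) (by omega)
    have hrrun : ∀ i : Int, nr < i → i ≤ r → 0 ≤ i ∧ R.getD i.toNat 0 = w := by
      intro i h1 h2
      rcases eq_or_lt_of_le h2 with rfl | hi'
      · exact ⟨hr0, rfl⟩
      · exact skipB_run R w (r - 1) i h1 (by omega)
    have htakeEq : R.take (r + 1).toNat
        = R.take (nr + 1).toNat ++ List.replicate ((r + 1).toNat - (nr + 1).toNat) w := by
      apply take_eq_append_replicate R (nr + 1).toNat (r + 1).toNat (by omega) (by omega) w
      intro i hi1 hi2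
      have h1 : nr < (i : Int) := by omega
      have h2 : (i : Int) ≤ r := by omega
      have := (hrrun i h1 h2).2
      rwa [Int.toNat_natCast] at this
    have hwmax : ∀ y ∈ R.take (r + 1).toNat, y ≤ w := by
      intro y hy
      have hrt : (r + 1).toNat = r.toNat + 1 := by omega
      rw [hrt] at hy
      have := mem_take_le R hR r.toNat (by omega) y hy
      rwa [← hw] at this
    have hlt' : ∀ y ∈ R.take (nr + 1).toNat, y < w := by
      intro y hy
      by_cases h0 : 0 ≤ nr
      · have hnt : (nr + 1).toNat = nr.toNat + 1 := by omega
        rw [hnt] at hy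
        have hlen : nr.toNat < R.length := by omega
        have h1 := mem_take_le R hR nr.toNat hlen y hy
        rcases skipB_stop R w (r - 1) with hneg | hne
        · rw [← hnr] at hneg; omega
        · rw [← hnr] at hne
          have h2 := getD_mono R hR nr.toNat r.toNat (by omega) (by omega)
          rw [← hw] at h2
          omega
      · have hnt : (nr + 1).toNat = 0 := by omega
        rw [hnt] at hy
        simp at hy
    have hvmin : ∀ x ∈ L.drop l, v ≤ x := by
      intro x hx
      have := mem_drop_le L hL l hl x hx
      rwa [← hv] at this
    split
    case isTrue hS =>
      rw [loopA_eq L R S nl nr _ hL hR (by omega)]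
      have hcnt : cnt L R S l r = ((nl : Int) - (l : Int)) * (r - nr) + cnt L R S nl nr := by
        rw [cnt, hdropEq, List.map_append, List.sum_append]
        have hrep : ((List.replicate (nl - l) v).map
            (fun x => ((List.count (S - x) (R.take (r + 1).toNat)) : Int))).sum
            = ((nl : Int) - (l : Int)) * (r - nr) := by
          rw [List.map_replicate, List.sum_replicate]
          have hc : List.count (S - v) (R.take (r + 1).toNat)
              = (r + 1).toNat - (nr + 1).toNat := by
            rw [htakeEq, List.count_append]
            have hz : List.count (S - v) (R.take (nr + 1).toNat) = 0 := by
              apply List.count_eq_zero.mpr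
              intro hmem
              have := hlt' _ hmem
              omega
            rw [hz, List.count_replicate]
            have hbe : (w == S - v) = true := by rw [beq_iff_eq]; omega
            rw [hbe]
            simp
          rw [hc, nsmul_eq_mul,
            show (((nl - l : Nat)) : Int) = (nl : Int) - (l : Int) by omega,
            show ((((r + 1).toNat - (nr + 1).toNat : Nat)) : Int) = r - nr by omega]
        rw [hrep]
        have hmapEq : (L.drop nl).map
            (fun x => ((List.count (S - x) (R.take (r + 1).toNat)) : Int))
            = (L.drop nl).map
            (fun x => ((List.count (S - x) (R.take (nr + 1).toNat)) : Int)) := by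
          apply List.map_congr_left
          intro x hx
          rw [htakeEq, List.count_append]
          have hz : List.count (S - x) (List.replicate ((r + 1).toNat - (nr + 1).toNat) w) = 0 := by
            rw [List.count_replicate]
            have hxv := hgt x hx
            have hbe : (w == S - x) = false := by rw [beq_eq_false_iff_ne]; omega
            rw [hbe]
            simp
          rw [hz]
          simp
        rw [hmapEq, cnt]
      rw [hcnt]; ring
    case isFalse hS0 =>
      split
      case isTrue hS =>
        rw [loopA_eq L R S nl r _ hL hR hr]
        have hcnt : cnt L R S l r = cnt L R S nl r := by
          rw [cnt, hdropEq, List.map_append, List.sum_append, cnt]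
          have hrep : ((List.replicate (nl - l) v).map
              (fun x => ((List.count (S - x) (R.take (r + 1).toNat)) : Int))).sum = 0 := by
            rw [List.map_replicate, List.sum_replicate]
            have hz : List.count (S - v) (R.take (r + 1).toNat) = 0 := by
              apply List.count_eq_zero.mpr
              intro hmem
              have := hwmax _ hmem
              omega
            rw [hz]
            simp
          rw [hrep, zero_add]
        rw [hcnt]
      case isFalse hS1 =>
        rw [loopA_eq L R S l nr _ hL hR (by omega)]
        have hcnt : cnt L R S l r = cnt L R S l nr := by
          rw [cnt, cnt]
          apply congrArg
          apply List.map_congr_left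
          intro x hx
          rw [htakeEq, List.count_append]
          have hz : List.count (S - x) (List.replicate ((r + 1).toNat - (nr + 1).toNat) w) = 0 := by
            rw [List.count_replicate]
            have hxv := hvmin x hx
            have hbe : (w == S - x) = false := by rw [beq_eq_false_iff_ne]; omega
            rw [hbe]
            simp
          rw [hz]
          simp
        rw [hcnt]
termination_by (L.length - l) + (r + 1).toNat
decreasing_by
  all_goals
    have h1 := le_skipF L (L.getD l 0) (l + 1)
    have h2 := skipB_le R (R.getD r.toNat 0) (r - 1)
    try have e1 : skipF L v (l + 1) = skipF L (L.getD l 0) (l + 1) := rfl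
    try have e2 : skipB R w (r - 1) = skipB R (R.getD r.toNat 0) (r - 1) := rfl
    omega


theorem rawA_eq_asums (seq : List Int) :
    (PySem.List.pyRange 0 ((seq.length : Int) + 1)).foldl
      (fun acc i => (combs seq i.toNat).foldl (fun a c => a ++ [c.sum]) acc) [] = asums seq := by
  have hcast : ((seq.length : Int) + 1) = ((seq.length + 1 : Nat) : Int) := by push_cast; ring
  rw [hcast, PySem.List.pyRange_zero_natCast, List.foldl_map]
  simp only [Int.toNat_natCast, PySem.List.foldl_append_singleton_eq_map]
  rw [PySem.List.foldl_append_eq_flatMap]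
  rfl

theorem getSubSum_perm (seq : List Int) : (getSubSum seq).Perm (subsetSums seq) := by
  rw [getSubSum, rawA_eq_asums]
  exact (PySem.List.sorted_perm _ _ _).trans (asums_perm_subsetSums seq)

theorem getSubSum_pairwise (seq : List Int) : (getSubSum seq).Pairwise (· ≤ ·) := by
  rw [getSubSum]
  simpa using PySem.List.sorted_pairwise _ (fun x => x)

-- ===== VERDICT (by name: the statement is the Claim_ definition above) =====
theorem solution_spec : Claim_equal_solution := by
  unfold Claim_equal_solution
  intro N S nums _
  unfold Spec_solution solution solution_alt
  dsimp only
  set half := PySem.Int.floordiv N 2 with hhalf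
  set left := PySem.List.slice nums none (some half) with hleft
  set right := PySem.List.slice nums (some half) none with hright
  set L := getSubSum left with hL
  set R := getSubSum right with hR
  have hA : loopA L R S 0 ((R.length : Int) - 1) 0
      = (L.map (fun x => ((List.count (S - x) R : Nat) : Int))).sum := by
    rw [loopA_eq L R S 0 _ 0 (getSubSum_pairwise left) (getSubSum_pairwise right) (by omega),
      cnt, List.drop_zero, zero_add,
      show ((R.length : Int) - 1 + 1).toNat = R.length by omega, List.take_length]
  have hfreq : ∀ k : Int, ((subsetSums right).foldl
        (fun d s => d.insert s (d.getD s 0 + 1)) (PySem.Dict.empty : PySem.Dict Int Int)).getD k 0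
      = ((List.count k (subsetSums right) : Nat) : Int) := by
    intro k
    rw [PySem.Dict.getD_foldl_insert_add_one]
    show (0 : Int) + _ = _
    rw [zero_add]
  have hB : (subsetSums left).foldl (fun a ls =>
        a + ((subsetSums right).foldl (fun d s => d.insert s (d.getD s 0 + 1))
          (PySem.Dict.empty : PySem.Dict Int Int)).getD (S - ls) 0) 0
      = ((subsetSums left).map
          (fun x => ((List.count (S - x) (subsetSums right) : Nat) : Int))).sum := by
    rw [PySem.List.foldl_add, zero_add]
    congr 1
    apply List.map_congr_left
    intro ls _
    rw [hfreq]
  have hmain : (L.map (fun x => ((List.count (S - x) R : Nat) : Int))).sum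
      = ((subsetSums left).map
          (fun x => ((List.count (S - x) (subsetSums right) : Nat) : Int))).sum := by
    have hf : (fun x => ((List.count (S - x) R : Nat) : Int))
        = (fun x => ((List.count (S - x) (subsetSums right) : Nat) : Int)) := by
      funext x
      rw [(getSubSum_perm right).count_eq]
    rw [hf]
    exact ((getSubSum_perm left).map _).sum_eq
  rw [hA, hB, hmain]
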